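-- pv_equiv track=rewrite | github.com/DayanFA/Sistemas-de-Informacao-UFAC | Linguagem de Programação I/Extras/Beecrowd/3358.py | is_difficult
-- ===== SOURCE A (Python) =====
-- def is_difficult(surname):
--     consonants = 'bcdfghjklmnpqrstvwxyzBCDFGHJKLMNPQRSTVWXYZ'
--     count = 0
--     for char in surname:
--         if char in consonants:
--             count += 1
--             if count >= 3:
--                 return True
--         else:
--             count = 0
--     return False
-- ===== SOURCE B (Python) =====
-- def is_difficult(surname):
--     cs = 'bcdfghjklmnpqrstvwxyzBCDFGHJKLMNPQRSTVWXYZ'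
--     return any(a in cs and b in cs and c in cs
--                for a, b, c in zip(surname, surname[1:], surname[2:]))
-- ===== Notes on version B (the rewrite author's own statement) =====
-- stated objective: idiomatic
-- what changed: Replaces the stateful counter-with-reset scan by a stateless sliding-window check: any() over zip(surname, surname[1:], surname[2:]) asking whether some window of three consecutive characters is all consonants.
import Mathlib
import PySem

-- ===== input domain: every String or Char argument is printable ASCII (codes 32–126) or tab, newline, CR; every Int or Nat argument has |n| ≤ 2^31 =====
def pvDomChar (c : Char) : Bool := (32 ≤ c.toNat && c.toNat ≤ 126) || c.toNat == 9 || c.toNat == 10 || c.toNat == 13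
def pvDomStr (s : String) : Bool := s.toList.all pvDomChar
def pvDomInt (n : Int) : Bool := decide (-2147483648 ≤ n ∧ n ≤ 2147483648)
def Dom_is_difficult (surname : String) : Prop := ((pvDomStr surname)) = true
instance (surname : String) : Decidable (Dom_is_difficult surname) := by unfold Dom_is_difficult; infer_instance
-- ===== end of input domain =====

-- B replaces A's counter-with-reset scan by an idiomatic sliding-window any() over
-- zip(surname, surname[1:], surname[2:]); same O(n) cost, return value only.

-- ===== PORT A =====
-- the consonant string of A
def pvConsA : List Char := "bcdfghjklmnpqrstvwxyzBCDFGHJKLMNPQRSTVWXYZ".toList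

-- the for-loop of A: state = count; early 'return True' modelled by the true branch
def pvLoopA : List Char → Nat → Bool
  | [], _ => false
  | ch :: rest, count =>
    if pvConsA.contains ch then
      if count + 1 ≥ 3 then true else pvLoopA rest (count + 1)
    else pvLoopA rest 0

def is_difficult (surname : String) : Bool := pvLoopA surname.toList 0

-- ===== PORT B =====
-- the consonant string of B
def pvConsB : List Char := "bcdfghjklmnpqrstvwxyzBCDFGHJKLMNPQRSTVWXYZ".toList

-- zip(surname, surname[1:], surname[2:]) : s[k:] for k ≥ 0 is List.drop k on the chars (exact)
def is_difficult_alt (surname : String) : Bool :=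
  let l := surname.toList
  (l.zip ((l.drop 1).zip (l.drop 2))).any fun t =>
    pvConsB.contains t.1 && pvConsB.contains t.2.1 && pvConsB.contains t.2.2

-- ===== PRECONDITION & SPEC =====
def Spec_is_difficult (surname : String) (out : Bool) : Prop := out = is_difficult_alt surname
instance (surname : String) (out : Bool) : Decidable (Spec_is_difficult surname out) := by unfold Spec_is_difficult; infer_instance

-- ===== CLAIM (what is proved, stated in full; the proofs are below) =====
def Claim_equal_is_difficult : Prop := ∀ (surname : String), Dom_is_difficult surname → Spec_is_difficult surname (is_difficult surname)

-- ===== LEMMAS AND PROOFS =====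

-- B's window-any expression, on a raw char list (proof-side name for B's body)
def pvZany (l : List Char) : Bool :=
  (l.zip ((l.drop 1).zip (l.drop 2))).any fun t =>
    pvConsB.contains t.1 && pvConsB.contains t.2.1 && pvConsB.contains t.2.2

theorem pvZany_alt (s : String) : is_difficult_alt s = pvZany s.toList := rfl

-- "the first n chars exist and are all consonants"
def pvPfx : Nat → List Char → Bool
  | 0, _ => true
  | _ + 1, [] => false
  | n + 1, c :: t => pvConsB.contains c && pvPfx n t

theorem pvCons_eq : pvConsB = pvConsA := rfl

theorem pvZany_nil : pvZany [] = false := rfl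
theorem pvZany_one (a : Char) : pvZany [a] = false := rfl
theorem pvZany_two (a b : Char) : pvZany [a, b] = false := rfl

theorem pvZany_cons3 (a b c : Char) (t : List Char) :
    pvZany (a :: b :: c :: t) =
      ((pvConsB.contains a && pvConsB.contains b && pvConsB.contains c) || pvZany (b :: c :: t)) := by
  simp [pvZany, List.any_cons]

theorem pvPfx_succ_imp (n : Nat) (l : List Char) (h : pvPfx (n + 1) l = true) : pvPfx n l = true := by
  induction n generalizing l with
  | zero => rfl
  | succ m ih =>
    cases l with
    | nil => simp [pvPfx] at h
    | cons c t =>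
      simp [pvPfx] at h ⊢
      exact ⟨h.1, ih t h.2⟩

-- pvPfx 3 l means the first window of 3 is all consonants, hence the any() fires
theorem pvPfx3_zany (l : List Char) (hp : pvPfx 3 l = true) : pvZany l = true := by
  match l with
  | [] => simp [pvPfx] at hp
  | [a] => simp [pvPfx] at hp
  | [a, b] => simp [pvPfx] at hp
  | a :: b :: c :: t =>
    simp [pvPfx] at hp
    simp [pvZany_cons3, hp.1, hp.2.1, hp.2.2]

-- unfold pvZany (c :: rest) into "window starting at head" plus pvZany rest
theorem pvZany_cons (c : Char) (rest : List Char) :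
    pvZany (c :: rest) = ((pvConsB.contains c && pvPfx 2 rest) || pvZany rest) := by
  match rest with
  | [] => simp [pvZany_one, pvZany_nil, pvPfx]
  | [b] => simp [pvZany_two, pvZany_one, pvPfx]
  | b :: d :: t => simp [pvZany_cons3, pvPfx, Bool.and_assoc]

-- A's loop in terms of B's window check: with `count` consonants already seen (count ≤ 2),
-- A succeeds iff the next 3-count chars are consonants or some later window of 3 is
theorem pvLoopA_eq (l : List Char) : ∀ count : Nat, count ≤ 2 →
    pvLoopA l count = (pvPfx (3 - count) l || pvZany l) := by
  induction l with
  | nil =>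
    intro count hc
    interval_cases count <;> simp [pvLoopA, pvPfx, pvZany_nil]
  | cons c rest ih =>
    intro count hc
    by_cases hm : c ∈ pvConsA
    · interval_cases count
      · have h1 := ih 1 (by omega)
        simp [pvLoopA, hm, h1, pvPfx, pvZany_cons, pvCons_eq]
      · have h2 := ih 2 (by omega)
        simp [pvLoopA, hm, h2, pvPfx, pvZany_cons, pvCons_eq]
        cases hp : pvPfx 2 rest
        · simp
        · have h1 := pvPfx_succ_imp 1 rest hp
          simp [h1]
      · simp [pvLoopA, hm, pvPfx, pvCons_eq]
    · have h0 := ih 0 (by omega)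
      have h3 : pvPfx (3 - count) (c :: rest) = false := by
        obtain ⟨m, hm'⟩ : ∃ m, 3 - count = m + 1 := ⟨2 - count, by omega⟩
        simp [hm', pvPfx, pvCons_eq, hm]
      simp [pvLoopA, hm, h0, h3, pvZany_cons, pvCons_eq]
      cases hp : pvPfx 3 rest
      · simp
      · simp [pvPfx3_zany rest hp]

-- ===== VERDICT (by name: the statement is the Claim_ definition above) =====
theorem is_difficult_spec : Claim_equal_is_difficult := by
  intro s _
  unfold Spec_is_difficult
  rw [pvZany_alt]
  have h := pvLoopA_eq s.toList 0 (by omega)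
  simp only [is_difficult, h]
  cases hp : pvPfx 3 s.toList
  · simp
  · simp [pvPfx3_zany s.toList hp]
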